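-- pv_equiv track=rewrite | github.com/steeplejack/adventofcode | 2023/day12/solution_python/part1.py | blockcount
-- ===== SOURCE A (Python) =====
-- def blockcount(s):
--     x = [0]
--     i = 0
--     for char in s:
--         if char == '#':
--             x[i] += 1
--         else:
--             if x[i] > 0:
--                 i += 1
--                 x.append(0)
--     if x[-1] == 0:
--         return x[:-1]
--     else:
--         return x
-- ===== SOURCE B (Python) =====
-- def blockcount(s):
--     return [len(part) for part in ''.join(c if c == '#' else ' ' for c in s).split()]
-- ===== Notes on version B (the rewrite author's own statement) =====
-- stated objective: idiomatic
-- what changed: Replaces the hand-rolled index/append/trailing-zero-trim scanner with normalizing every non-hash character to a space and letting str.split() extract the maximal hash runs, whose lengths are the answer.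
import Mathlib
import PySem

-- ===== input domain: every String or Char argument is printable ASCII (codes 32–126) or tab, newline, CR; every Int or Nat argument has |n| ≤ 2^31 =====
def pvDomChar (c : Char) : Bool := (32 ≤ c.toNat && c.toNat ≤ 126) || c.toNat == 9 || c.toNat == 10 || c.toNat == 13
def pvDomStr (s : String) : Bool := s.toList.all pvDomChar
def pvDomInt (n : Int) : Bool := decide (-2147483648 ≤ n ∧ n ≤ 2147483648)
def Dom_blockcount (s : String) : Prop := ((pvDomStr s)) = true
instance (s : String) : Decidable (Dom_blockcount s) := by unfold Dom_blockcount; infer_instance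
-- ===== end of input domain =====

-- B replaces A's index/append/trailing-zero-trim scanner by normalizing non-hash chars to spaces
-- and splitting with str.split(); objective: idiomatic (same O(n) cost).


-- ===== PORT A =====
-- one iteration of A's for-loop: state = (x, i); i is Python's int index into x,
-- always 0 ≤ i = len(x)-1 along the loop, so it is kept as a Nat (exact here)
def blockcountStep (st : List Int × Nat) (c : Char) : List Int × Nat :=
  if c = '#' then
    (st.1.set st.2 (st.1.getD st.2 0 + 1), st.2)       -- x[i] += 1
  else
    if 0 < st.1.getD st.2 0 then                        -- if x[i] > 0
      (st.1 ++ [0], st.2 + 1)                           -- i += 1; x.append(0)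
    else st

def blockcount (s : String) : List Int :=
  let st := s.toList.foldl blockcountStep ([0], 0)
  if PySem.List.pyGet? st.1 (-1) = some 0 then          -- if x[-1] == 0
    PySem.List.slice st.1 none (some (-1))              -- return x[:-1]
  else st.1                                             -- return x

-- ===== PORT B =====
def blockcount_alt (s : String) : List Int :=
  (PySem.Str.split₀ (String.ofList (s.toList.map (fun c => if c = '#' then c else ' ')))).map
    (fun part => PySem.Str.len part)

-- ===== PRECONDITION & SPEC =====
def Spec_blockcount (s : String) (out : List Int) : Prop := out = blockcount_alt s
instance (s : String) (out : List Int) : Decidable (Spec_blockcount s out) := by unfold Spec_blockcount; infer_instance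

-- ===== CLAIM (what is proved, stated in full; the proofs are below) =====
def Claim_equal_blockcount : Prop := ∀ (s : String), Dom_blockcount s → Spec_blockcount s (blockcount s)

-- ===== LEMMAS AND PROOFS =====

-- reference run-lengths: lengths of maximal '#'-runs of cs, with n the length of the open run
def pvRuns : List Char → Nat → List Nat
  | [], n => if n = 0 then [] else [n]
  | c :: cs, n =>
    if c = '#' then pvRuns cs (n + 1)
    else if n = 0 then pvRuns cs 0 else n :: pvRuns cs 0

lemma pvGetD_concat (out : List Int) (n : Int) : (out ++ [n]).getD out.length 0 = n := by
  simp [List.getD]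

lemma pvSet_concat (out : List Int) (n v : Int) :
    (out ++ [n]).set out.length v = out ++ [v] := by
  rw [List.set_append_right _ _ (le_refl _)]; simp

lemma pvPyGet_concat (out : List Int) (n : Int) :
    PySem.List.pyGet? (out ++ [n]) (-1) = some n := by
  simp [PySem.List.pyGet?, PySem.List.pyIdx?]

lemma pvSlice_concat (out : List Int) (n : Int) :
    PySem.List.slice (out ++ [n]) none (some (-1)) = out := by
  simp [PySem.List.slice]

lemma pvA_loop (cs : List Char) : ∀ (out : List Int) (n : Nat),
    (if PySem.List.pyGet? (cs.foldl blockcountStep (out ++ [(n : Int)], out.length)).1 (-1) = some 0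
     then PySem.List.slice (cs.foldl blockcountStep (out ++ [(n : Int)], out.length)).1 none (some (-1))
     else (cs.foldl blockcountStep (out ++ [(n : Int)], out.length)).1)
    = out ++ (pvRuns cs n).map Int.ofNat := by
  induction cs with
  | nil =>
    intro out n
    simp only [List.foldl_nil, pvRuns, pvPyGet_concat]
    by_cases hn : n = 0
    · subst hn
      rw [if_pos rfl, pvSlice_concat]
      simp
    · rw [if_neg (by simpa using hn), if_neg hn]
      simp
  | cons c cs ih =>
    intro out n
    rw [List.foldl_cons]
    by_cases hc : c = '#'
    · subst hc
      have hstep : blockcountStep (out ++ [(n : Int)], out.length) '#'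
          = (out ++ [((n + 1 : Nat) : Int)], out.length) := by
        simp only [blockcountStep, pvGetD_concat, pvSet_concat]
        push_cast; ring_nf
      rw [hstep, ih out (n + 1)]
      simp [pvRuns]
    · by_cases hn : n = 0
      · subst hn
        have hstep : blockcountStep (out ++ [((0 : Nat) : Int)], out.length) c
            = (out ++ [((0 : Nat) : Int)], out.length) := by
          simp [blockcountStep, hc]
        rw [hstep, ih out 0]
        simp [pvRuns, hc]
      · have hstep : blockcountStep (out ++ [(n : Int)], out.length) c
            = ((out ++ [(n : Int)]) ++ [((0 : Nat) : Int)], (out ++ [(n : Int)]).length) := by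
          simp only [blockcountStep, if_neg hc, pvGetD_concat]
          rw [if_pos (by exact_mod_cast Nat.pos_of_ne_zero hn)]
          simp
        rw [hstep, ih (out ++ [(n : Int)]) 0]
        simp [pvRuns, hc, hn]

lemma pvGoHash (cs : List Char) (cur : List Char) (acc : List (List Char)) :
    PySem.Chars.split₀.go ('#' :: cs) cur acc = PySem.Chars.split₀.go cs ('#' :: cur) acc := by
  simp [PySem.Chars.split₀.go, show PySem.Chars.isspace '#' = false from by decide]

lemma pvGoSpace (cs : List Char) (cur : List Char) (acc : List (List Char)) :
    PySem.Chars.split₀.go (' ' :: cs) cur acc =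
      if cur = [] then PySem.Chars.split₀.go cs [] acc
      else PySem.Chars.split₀.go cs [] (cur.reverse :: acc) := by
  simp [PySem.Chars.split₀.go, show PySem.Chars.isspace ' ' = true from by decide]

lemma pvGoNil (cur : List Char) (acc : List (List Char)) :
    PySem.Chars.split₀.go [] cur acc =
      if cur = [] then acc.reverse else (cur.reverse :: acc).reverse := by
  simp [PySem.Chars.split₀.go]

lemma pvB_loop (cs : List Char) : ∀ (cur : List Char) (acc : List (List Char)),
    (PySem.Chars.split₀.go (cs.map (fun c => if c = '#' then c else ' ')) cur acc).map List.length
    = acc.reverse.map List.length ++ pvRuns cs cur.length := by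
  induction cs with
  | nil =>
    intro cur acc
    rw [List.map_nil, pvGoNil, pvRuns]
    by_cases hcur : cur = []
    · subst hcur; simp
    · rw [if_neg hcur, if_neg (by simpa [List.length_eq_zero_iff] using hcur)]
      simp
  | cons c cs ih =>
    intro cur acc
    by_cases hc : c = '#'
    · subst hc
      rw [List.map_cons, if_pos rfl, pvGoHash, ih ('#' :: cur) acc, pvRuns]
      simp
    · rw [List.map_cons, if_neg hc, pvGoSpace]
      by_cases hcur : cur = []
      · subst hcur
        rw [if_pos rfl, ih [] acc, pvRuns]
        simp [hc]
      · rw [if_neg hcur, ih [] (cur.reverse :: acc), pvRuns]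
        rw [if_neg hc, if_neg (by simpa [List.length_eq_zero_iff] using hcur)]
        simp

-- ===== VERDICT (by name: the statement is the Claim_ definition above) =====
theorem blockcount_spec : Claim_equal_blockcount := by
  intro s _
  unfold Spec_blockcount blockcount blockcount_alt
  have hA := pvA_loop s.toList [] 0
  simp only [List.nil_append, List.length_nil, Nat.cast_zero] at hA
  rw [hA]
  have hsplit := PySem.Str.split₀_map_toList
    (String.ofList (s.toList.map (fun c => if c = '#' then c else ' ')))
  have hmk : (String.ofList (s.toList.map (fun c => if c = '#' then c else ' '))).toList
      = s.toList.map (fun c => if c = '#' then c else ' ') := by simp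
  rw [hmk] at hsplit
  have hB := pvB_loop s.toList [] []
  simp only [List.reverse_nil, List.map_nil, List.nil_append, List.length_nil] at hB
  have hgo : PySem.Chars.split₀ (s.toList.map (fun c => if c = '#' then c else ' '))
      = PySem.Chars.split₀.go (s.toList.map (fun c => if c = '#' then c else ' ')) [] [] := rfl
  rw [← hB, ← hgo, ← hsplit, List.map_map, List.map_map]
  apply List.map_congr_left
  intro p _
  simp [PySem.Str.len]
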